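-- pv_equiv track=rewrite | github.com/skonuru8/browser | browser.py | parse_declarations
-- ===== SOURCE A (Python) =====
-- def parse_declarations(body):
--     declarations = {}
--     for part in body.split(";"):
--         if ":" not in part:
--             continue
--         prop, value = part.split(":", 1)
--         declarations[prop.strip().casefold()] = value.strip()
--     return declarations
-- ===== SOURCE B (Python) =====
-- def parse_declarations(body):
--     # one-pass character state machine: no split lists, no per-part re-splitting
--     declarations = {}
--     prop_buf = []
--     buf = []
--     in_value = False
--     for ch in body:
--         if ch == ";":
--             if in_value:
--                 declarations["".join(prop_buf).strip().casefold()] = "".join(buf).strip()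
--             prop_buf = []
--             buf = []
--             in_value = False
--         elif ch == ":" and not in_value:
--             prop_buf = buf
--             buf = []
--             in_value = True
--         else:
--             buf.append(ch)
--     if in_value:
--         declarations["".join(prop_buf).strip().casefold()] = "".join(buf).strip()
--     return declarations
-- ===== Notes on version B (the rewrite author's own statement) =====
-- stated objective: alternative
-- what changed: Replaced split-on-';' plus per-part split-on-':' with a single character-by-character state machine that buffers property/value and commits at each ';' and at end of input.
import Mathlib
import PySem

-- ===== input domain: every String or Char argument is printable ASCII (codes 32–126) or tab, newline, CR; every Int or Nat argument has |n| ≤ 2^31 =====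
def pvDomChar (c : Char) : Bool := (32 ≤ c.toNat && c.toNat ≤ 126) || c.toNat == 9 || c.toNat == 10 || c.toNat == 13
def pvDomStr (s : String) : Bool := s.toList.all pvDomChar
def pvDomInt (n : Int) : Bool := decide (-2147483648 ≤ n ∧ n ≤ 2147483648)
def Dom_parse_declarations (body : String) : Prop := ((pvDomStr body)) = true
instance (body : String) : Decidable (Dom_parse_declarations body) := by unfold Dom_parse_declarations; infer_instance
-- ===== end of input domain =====

-- B replaces split-on-';' plus per-part split-on-':' by a single character-by-character state machine (return value only; neither version mutates its argument).

-- ===== PORT A =====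
-- the loop body of A, named (casefold ported as lower: exact on the ASCII domain)
def pdPart (declarations : PySem.Dict String String) (part : String) : PySem.Dict String String :=
  if PySem.Str.isIn ":" part = false then declarations
  else
    match (PySem.Str.splitMax? part ":" 1).getD [] with
    | [prop, value] =>
        declarations.insert (PySem.Str.lower (PySem.Str.strip prop)) (PySem.Str.strip value)
    | _ => declarations

def parse_declarations (body : String) : List (String × String) :=
  ((((PySem.Str.split? body ";").getD []).foldl pdPart PySem.Dict.empty)).items

-- ===== PORT B =====
-- one step of B's state machine: state = (declarations, prop_buf, buf, in_value)
def pdStep (st : PySem.Dict String String × List Char × List Char × Bool) (ch : Char) :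
    PySem.Dict String String × List Char × List Char × Bool :=
  match st with
  | (decls, propBuf, buf, inValue) =>
    if ch = ';' then
      ((if inValue then
          decls.insert (PySem.Str.lower (PySem.Str.strip (String.ofList propBuf)))
            (PySem.Str.strip (String.ofList buf))
        else decls), [], [], false)
    else if ch = ':' ∧ inValue = false then
      (decls, buf, [], true)
    else
      (decls, propBuf, buf ++ [ch], inValue)

def parse_declarations_alt (body : String) : List (String × String) :=
  match body.toList.foldl pdStep (PySem.Dict.empty, [], [], false) with
  | (decls, propBuf, buf, inValue) =>
    (if inValue then
        decls.insert (PySem.Str.lower (PySem.Str.strip (String.ofList propBuf)))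
          (PySem.Str.strip (String.ofList buf))
      else decls).items

-- ===== PRECONDITION & SPEC =====
def Spec_parse_declarations (body : String) (out : List (String × String)) : Prop := out = parse_declarations_alt body
instance (body : String) (out : List (String × String)) : Decidable (Spec_parse_declarations body out) := by unfold Spec_parse_declarations; infer_instance

-- ===== CLAIM (what is proved, stated in full; the proofs are below) =====
def Claim_equal_parse_declarations : Prop := ∀ (body : String), Dom_parse_declarations body → Spec_parse_declarations body (parse_declarations body)

-- ===== LEMMAS AND PROOFS =====

-- the committed key/value of a finished segment
def pvKey (u : List Char) : String := PySem.Str.lower (PySem.Str.strip (String.ofList u))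
def pvVal (v : List Char) : String := PySem.Str.strip (String.ofList v)

-- flushing B's final state
def pvFinish (st : PySem.Dict String String × List Char × List Char × Bool) : PySem.Dict String String :=
  if st.2.2.2 then st.1.insert (pvKey st.2.1) (pvVal st.2.2.1) else st.1

-- the segments of cs between ';'s (split-on-';' on the char level)
def pvSegs : List Char → List (List Char)
  | [] => [[]]
  | x :: rest => if x = ';' then [] :: pvSegs rest else (pvSegs rest).modifyHead (x :: ·)

theorem pvSegs_ne_nil (cs : List Char) : pvSegs cs ≠ [] := by
  induction cs with
  | nil => simp [pvSegs]
  | cons x rest ih =>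
    by_cases hx : x = ';'
    · simp [pvSegs, hx]
    · rcases hseg : pvSegs rest with _ | ⟨h, t⟩
      · exact absurd hseg ih
      · simp [pvSegs, hx, hseg]

theorem pvSegs_no (cs : List Char) : ';' ∉ cs → pvSegs cs = [cs] := by
  induction cs with
  | nil => intro _; rfl
  | cons x rest ih =>
    intro h
    have hx : x ≠ ';' := by rintro rfl; exact h (by simp)
    have hr : ';' ∉ rest := fun hm => h (by simp [hm])
    simp [pvSegs, hx, ih hr]

theorem pvSegs_append (rest : List Char) (s1 : List Char) :
    ';' ∉ s1 → pvSegs (s1 ++ ';' :: rest) = s1 :: pvSegs rest := by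
  induction s1 with
  | nil => intro _; simp [pvSegs]
  | cons x s1' ih =>
    intro h
    have hx : x ≠ ';' := by rintro rfl; exact h (by simp)
    have hr : ';' ∉ s1' := fun hm => h (by simp [hm])
    simp only [List.cons_append, pvSegs, if_neg hx, ih hr, List.modifyHead_cons]

-- first-occurrence decomposition
theorem pvFirstSplit (c : Char) (cs : List Char) (h : c ∈ cs) :
    ∃ u v, cs = u ++ c :: v ∧ c ∉ u := by
  induction cs with
  | nil => cases h
  | cons x rest ih =>
    by_cases hx : x = c
    · exact ⟨[], rest, by simp [hx], by simp⟩
    · have h' : c ∈ rest := by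
        rcases List.mem_cons.mp h with h0 | h0
        · exact absurd h0.symm hx
        · exact h0
      obtain ⟨u, v, rfl, hnu⟩ := ih h'
      refine ⟨x :: u, v, by simp, ?_⟩
      intro hc
      rcases List.mem_cons.mp hc with h0 | h0
      · exact hx h0.symm
      · exact hnu h0

theorem pvMemSingletonInfix (a : Char) (l : List Char) : [a] <:+: l ↔ a ∈ l := by
  constructor
  · rintro ⟨s, t, rfl⟩; simp
  · intro h
    obtain ⟨s, t, rfl⟩ := List.append_of_mem h
    exact ⟨s, t, by simp⟩

-- splitOn.go on the single-char separator ';' computes pvSegs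
theorem pvGoSplit (cs : List Char) :
    ∀ (fuel : Nat) (cur : List Char) (acc : List (List Char)), cs.length ≤ fuel →
    PySem.Chars.splitOn.go [';'] fuel cs cur acc
      = acc.reverse ++ (pvSegs cs).modifyHead (cur.reverse ++ ·) := by
  induction cs with
  | nil =>
    intro fuel cur acc _
    cases fuel <;> simp [PySem.Chars.splitOn.go, pvSegs]
  | cons x rest ih =>
    intro fuel cur acc hf
    cases fuel with
    | zero => simp at hf
    | succ f =>
      have hf' : rest.length ≤ f := by simp at hf; omega
      by_cases hx : x = ';'
      · subst hx
        rw [show PySem.Chars.splitOn.go [';'] (f + 1) (';' :: rest) cur acc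
              = PySem.Chars.splitOn.go [';'] f rest [] (cur.reverse :: acc) from by
            simp [PySem.Chars.splitOn.go, List.isPrefixOf]]
        rw [ih f [] (cur.reverse :: acc) hf']
        rcases hseg : pvSegs rest with _ | ⟨h, t⟩
        · exact absurd hseg (pvSegs_ne_nil rest)
        · simp [pvSegs, hseg]
      · rw [show PySem.Chars.splitOn.go [';'] (f + 1) (x :: rest) cur acc
              = PySem.Chars.splitOn.go [';'] f rest (x :: cur) acc from by
            simp [PySem.Chars.splitOn.go, List.isPrefixOf, Ne.symm hx]]
        rw [ih f (x :: cur) acc hf']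
        rcases hseg : pvSegs rest with _ | ⟨h, t⟩
        · exact absurd hseg (pvSegs_ne_nil rest)
        · simp [pvSegs, hx, hseg]

theorem pvSplitOn (cs : List Char) : PySem.Chars.splitOn cs [';'] = pvSegs cs := by
  simp only [PySem.Chars.splitOn]
  rw [pvGoSplit cs (cs.length + 1) [] [] (by omega)]
  rcases hseg : pvSegs cs with _ | ⟨h, t⟩
  · exact absurd hseg (pvSegs_ne_nil cs)
  · simp

-- splitOnMax.go with the split budget exhausted
theorem pvGoMaxZero (fuel : Nat) (l cur : List Char) (acc : List (List Char)) :
    PySem.Chars.splitOnMax.go [':'] fuel 0 l cur acc = acc.reverse ++ [cur.reverse ++ l] := by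
  cases l with
  | nil => cases fuel <;> simp [PySem.Chars.splitOnMax.go]
  | cons c rest => cases fuel <;> simp [PySem.Chars.splitOnMax.go]

-- splitOnMax.go with maxsplit = 1 on a string whose first ':' separates u from v
theorem pvGoMaxOne (v : List Char) (u : List Char) :
    ∀ (fuel : Nat) (cur : List Char) (acc : List (List Char)),
    (u ++ ':' :: v).length ≤ fuel → ':' ∉ u →
    PySem.Chars.splitOnMax.go [':'] fuel 1 (u ++ ':' :: v) cur acc
      = acc.reverse ++ [cur.reverse ++ u, v] := by
  induction u with
  | nil =>
    intro fuel cur acc hf _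
    simp only [List.nil_append] at hf ⊢
    cases fuel with
    | zero => simp at hf
    | succ f =>
      rw [show PySem.Chars.splitOnMax.go [':'] (f + 1) 1 (':' :: v) cur acc
            = PySem.Chars.splitOnMax.go [':'] f 0 v [] (cur.reverse :: acc) from by
          simp [PySem.Chars.splitOnMax.go, List.isPrefixOf]]
      rw [pvGoMaxZero]
      simp
  | cons x u' ih =>
    intro fuel cur acc hf hu
    have hx : x ≠ ':' := by rintro rfl; exact hu (by simp)
    have hu' : ':' ∉ u' := fun hm => hu (by simp [hm])
    simp only [List.cons_append] at hf ⊢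
    cases fuel with
    | zero => simp at hf
    | succ f =>
      have hf' : (u' ++ ':' :: v).length ≤ f := by simp at hf ⊢; omega
      rw [show PySem.Chars.splitOnMax.go [':'] (f + 1) 1 (x :: (u' ++ ':' :: v)) cur acc
            = PySem.Chars.splitOnMax.go [':'] f 1 (u' ++ ':' :: v) (x :: cur) acc from by
          simp [PySem.Chars.splitOnMax.go, List.isPrefixOf, Ne.symm hx]]
      rw [ih f (x :: cur) acc hf' hu']
      simp

theorem pvSplitMax (u v : List Char) (hu : ':' ∉ u) :
    PySem.Chars.splitMax? (u ++ ':' :: v) [':'] 1 = some [u, v] := by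
  simp only [PySem.Chars.splitMax?]
  rw [if_neg (by simp)]
  simp only [PySem.Chars.splitOnMax]
  rw [if_neg (by norm_num)]
  rw [show ((1 : Int)).toNat = 1 from rfl]
  rw [pvGoMaxOne v u ((u ++ ':' :: v).length + 1) [] [] (by omega) hu]
  simp

-- A's loop body on a segment without ':'
theorem pvPart_no (d : PySem.Dict String String) (seg : List Char) (h : ':' ∉ seg) :
    pdPart d (String.ofList seg) = d := by
  have hin : PySem.Str.isIn ":" (String.ofList seg) = false := by
    simp only [PySem.Str.isIn, String.toList_ofList]
    rw [show (":" : String).toList = [':'] from by decide]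
    rw [PySem.Chars.isIn_eq_false_iff, pvMemSingletonInfix]
    exact h
  unfold pdPart
  rw [hin]
  simp

-- A's loop body on a segment whose first ':' separates u from v
theorem pvPart_yes (d : PySem.Dict String String) (u v : List Char) (hu : ':' ∉ u) :
    pdPart d (String.ofList (u ++ ':' :: v)) = d.insert (pvKey u) (pvVal v) := by
  have hin : PySem.Str.isIn ":" (String.ofList (u ++ ':' :: v)) = true := by
    simp only [PySem.Str.isIn, String.toList_ofList]
    rw [show (":" : String).toList = [':'] from by decide]
    rw [PySem.Chars.isIn_iff_infix, pvMemSingletonInfix]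
    simp
  have hs : PySem.Str.splitMax? (String.ofList (u ++ ':' :: v)) ":" 1
      = some [String.ofList u, String.ofList v] := by
    simp only [PySem.Str.splitMax?, String.toList_ofList]
    rw [show (":" : String).toList = [':'] from by decide]
    rw [pvSplitMax u v hu]
    rfl
  unfold pdPart
  rw [hin, hs]
  simp [pvKey, pvVal]

-- B's scan of ';'-free text while in_value
theorem pvScanInv (d : PySem.Dict String String) (p : List Char) (cs : List Char) :
    ∀ b : List Char, ';' ∉ cs →
    cs.foldl pdStep (d, p, b, true) = (d, p, b ++ cs, true) := by
  induction cs with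
  | nil => intro b _; simp
  | cons x rest ih =>
    intro b h
    have hx : x ≠ ';' := by rintro rfl; exact h (by simp)
    have hr : ';' ∉ rest := fun hm => h (by simp [hm])
    simp only [List.foldl_cons]
    rw [show pdStep (d, p, b, true) x = (d, p, b ++ [x], true) from by simp [pdStep, hx]]
    rw [ih (b ++ [x]) hr]
    simp

-- B's scan of ';'- and ':'-free text while not in_value
theorem pvScanProp (d : PySem.Dict String String) (p : List Char) (cs : List Char) :
    ∀ b : List Char, ';' ∉ cs → ':' ∉ cs →
    cs.foldl pdStep (d, p, b, false) = (d, p, b ++ cs, false) := by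
  induction cs with
  | nil => intro b _ _; simp
  | cons x rest ih =>
    intro b h hc
    have hx : x ≠ ';' := by rintro rfl; exact h (by simp)
    have hx2 : x ≠ ':' := by rintro rfl; exact hc (by simp)
    have hr : ';' ∉ rest := fun hm => h (by simp [hm])
    have hr2 : ':' ∉ rest := fun hm => hc (by simp [hm])
    simp only [List.foldl_cons]
    rw [show pdStep (d, p, b, false) x = (d, p, b ++ [x], false) from by simp [pdStep, hx, hx2]]
    rw [ih (b ++ [x]) hr hr2]
    simp

-- B's scan of a full ';'-free segment whose first ':' separates u from v
theorem pvScanSeg (u v : List Char) (hu : ':' ∉ u) (h1 : ';' ∉ u) (h2 : ';' ∉ v)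
    (d : PySem.Dict String String) (p b : List Char) :
    (u ++ ':' :: v).foldl pdStep (d, p, b, false) = (d, b ++ u, v, true) := by
  rw [List.foldl_append]
  rw [pvScanProp d p u b h1 hu]
  simp only [List.foldl_cons]
  rw [show pdStep (d, p, b ++ u, false) ':' = (d, b ++ u, [], true) from by simp [pdStep]]
  rw [pvScanInv d (b ++ u) v [] h2]
  simp

-- main invariant: flushing B's scan = A's fold over the segments
theorem pvMain (cs : List Char) (d : PySem.Dict String String) :
    pvFinish (cs.foldl pdStep (d, [], [], false))
      = (pvSegs cs).foldl (fun d' seg => pdPart d' (String.ofList seg)) d := by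
  by_cases hm : ';' ∈ cs
  · obtain ⟨s1, rest, hcs, h1⟩ := pvFirstSplit ';' cs hm
    rw [hcs]
    have hd : pdStep (s1.foldl pdStep (d, [], [], false)) ';'
        = (pdPart d (String.ofList s1), [], [], false) := by
      by_cases hc : ':' ∈ s1
      · obtain ⟨u, v, rfl, hu⟩ := pvFirstSplit ':' s1 hc
        have h1u : ';' ∉ u := fun hmm => h1 (by simp [hmm])
        have h1v : ';' ∉ v := fun hmm => h1 (by simp [hmm])
        rw [pvScanSeg u v hu h1u h1v d [] []]
        rw [pvPart_yes d u v hu]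
        simp [pdStep, pvKey, pvVal]
      · rw [pvScanProp d [] s1 [] h1 hc]
        rw [pvPart_no d s1 hc]
        simp [pdStep]
    rw [List.foldl_append, List.foldl_cons, hd]
    rw [pvMain rest (pdPart d (String.ofList s1))]
    rw [pvSegs_append rest s1 h1]
    simp
  · rw [pvSegs_no cs hm]
    simp only [List.foldl_cons, List.foldl_nil]
    by_cases hc : ':' ∈ cs
    · obtain ⟨u, v, rfl, hu⟩ := pvFirstSplit ':' cs hc
      have h1u : ';' ∉ u := fun hmm => hm (by simp [hmm])
      have h1v : ';' ∉ v := fun hmm => hm (by simp [hmm])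
      rw [pvScanSeg u v hu h1u h1v d [] []]
      rw [pvPart_yes d u v hu]
      simp [pvFinish, pvKey, pvVal]
    · rw [pvScanProp d [] cs [] hm hc]
      rw [pvPart_no d cs hc]
      simp [pvFinish]
termination_by cs.length
decreasing_by simp only [hcs, List.length_append, List.length_cons]; omega

-- ===== VERDICT (by name: the statement is the Claim_ definition above) =====
theorem parse_declarations_spec : Claim_equal_parse_declarations := by
  intro body _
  unfold Spec_parse_declarations parse_declarations parse_declarations_alt
  have hsplit : PySem.Str.split? body ";" = some ((pvSegs body.toList).map String.ofList) := by
    simp only [PySem.Str.split?]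
    rw [show (";" : String).toList = [';'] from by decide]
    simp only [PySem.Chars.split?]
    rw [if_neg (by simp)]
    rw [pvSplitOn]
    rfl
  rw [hsplit]
  simp only [Option.getD_some]
  rw [List.foldl_map]
  rcases hst : body.toList.foldl pdStep (PySem.Dict.empty, [], [], false) with ⟨d2, p2, b2, inv2⟩
  have hmain := pvMain body.toList PySem.Dict.empty
  rw [hst] at hmain
  rw [← hmain]
  simp [pvFinish, pvKey, pvVal]
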